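-- pv_equiv track=rewrite | github.com/Marsmjy/cosmic-replay-v4 | lib/har_extractor.py | relocate_premature_open_forms
-- ===== SOURCE A (Python) =====
-- def relocate_premature_open_forms(steps: list[dict]) -> list[dict]:
--     """⭐ 规则10：把过早的 open_form 挪到该表单第一次真正被使用的位置前。
--
--     HAR 中 dispatchFormLoad 可能出现在 HAR 最前面（浏览器预加载/缓存），
--     但真正使用（invoke/loadData/update_fields）发生在导航完成后。如果 open_form
--     和第一次使用之间隔着其他表单的导航步骤，说明 open_form 过早了——此时拿到的
--     pageId 在导航后已失效，必须推迟到使用前再打开。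
--
--     判定规则：
--     - open_form 后紧跟的步骤就是同一个 form_id → 位置正确，不动
--     - open_form 和同 form_id 的第一次 invoke 之间隔了别的表单操作 → 挪到那个 invoke 前
--     """
--     # 1) 找每个 open_form 的位置
--     open_form_info: dict[str, tuple[int, dict]] = {}  # form_id → (index, step)
--     for i, s in enumerate(steps):
--         if s.get("type") == "open_form":
--             fid = s.get("form_id")
--             if fid:
--                 open_form_info[fid] = (i, s)
--
--     # 2) 找每个 form_id 第一次被 invoke/update_fields/pick_basedata/loadData 使用的位置
--     USAGE_TYPES = {"invoke", "update_fields", "pick_basedata"}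
--     first_use: dict[str, int] = {}
--     for i, s in enumerate(steps):
--         fid = s.get("form_id")
--         if fid and s.get("type") in USAGE_TYPES and fid not in first_use:
--             first_use[fid] = i
--
--     # 3) 判定哪些 open_form 需要挪
--     to_relocate: dict[int, tuple[str, dict, int]] = {}  # orig_idx → (form_id, step, target_idx)
--     for fid, (oidx, ostep) in open_form_info.items():
--         use_idx = first_use.get(fid)
--         if use_idx is None:
--             continue  # 没有使用，不管
--         if use_idx <= oidx + 1:
--             continue  # open_form 紧跟使用，位置正确
--         # 检查中间是否有其他表单的操作（如果都是同 form_id 就不算"过早"）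
--         has_other_form = False
--         for j in range(oidx + 1, use_idx):
--             if steps[j].get("form_id") != fid:
--                 has_other_form = True
--                 break
--         if has_other_form:
--             to_relocate[oidx] = (fid, ostep, use_idx)
--
--     if not to_relocate:
--         return steps
--
--     # 4) 构建新步骤列表
--     out: list[dict] = []
--     skip_indices = set(to_relocate.keys())
--     # 按 target_idx 分组，多个 open_form 可能要插到同一个位置前
--     insert_before: dict[int, list[dict]] = {}
--     for orig_idx, (fid, ostep, target_idx) in to_relocate.items():
--         insert_before.setdefault(target_idx, []).append(ostep)
--
--     for i, s in enumerate(steps):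
--         if i in skip_indices:
--             continue
--         if i in insert_before:
--             for ins_step in insert_before[i]:
--                 out.append(ins_step)
--         out.append(s)
--     return out
-- ===== SOURCE B (Python) =====
-- from bisect import bisect_left, bisect_right
--
--
-- def relocate_premature_open_forms(steps: list[dict]) -> list[dict]:
--     """Move each premature open_form to just before its form's first real use.
--
--     The "is there another form's step in between" test uses per-form sorted
--     index lists + bisect instead of a scan over the intervening steps.
--     """
--     # sorted positions of every step carrying each (truthy) form_id
--     positions: dict[str, list[int]] = {}
--     for i, s in enumerate(steps):
--         fid = s.get("form_id")
--         if fid: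
--             positions.setdefault(fid, []).append(i)
--
--     # one combined pass: last open_form index and first usage index per form_id
--     USAGE = ("invoke", "update_fields", "pick_basedata")
--     opens: dict[str, int] = {}
--     first_use: dict[str, int] = {}
--     for i, s in enumerate(steps):
--         fid = s.get("form_id")
--         if fid:
--             t = s.get("type")
--             if t == "open_form":
--                 opens[fid] = i
--             elif t in USAGE and fid not in first_use:
--                 first_use[fid] = i
--
--     # decide the moves: count same-form steps strictly between oidx and use
--     moves: list[tuple[int, int]] = []  # (orig_idx, target_idx)
--     for fid, oidx in opens.items():
--         u = first_use.get(fid)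
--         if u is not None and u > oidx + 1:
--             lst = positions[fid]
--             same = bisect_left(lst, u) - bisect_right(lst, oidx)
--             if same < u - oidx - 1:  # some step in between is another form's
--                 moves.append((oidx, u))
--
--     if not moves:
--         return steps
--
--     removed = {o for o, _ in moves}
--     inserts: dict[int, list[dict]] = {}
--     for o, u in moves:
--         inserts.setdefault(u, []).append(steps[o])
--
--     return [x for i, s in enumerate(steps)
--             for x in ([] if i in removed else inserts.get(i, []) + [s])]
-- ===== Notes on version B (the rewrite author's own statement) =====
-- stated objective: alternative
-- what changed: Replaces A's inner scan between each open_form and its first use by per-form sorted index lists queried with bisect, merges A's two detection passes into one, and builds the output as a flat comprehension instead of A's skip/insert accumulator loop.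
import Mathlib
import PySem

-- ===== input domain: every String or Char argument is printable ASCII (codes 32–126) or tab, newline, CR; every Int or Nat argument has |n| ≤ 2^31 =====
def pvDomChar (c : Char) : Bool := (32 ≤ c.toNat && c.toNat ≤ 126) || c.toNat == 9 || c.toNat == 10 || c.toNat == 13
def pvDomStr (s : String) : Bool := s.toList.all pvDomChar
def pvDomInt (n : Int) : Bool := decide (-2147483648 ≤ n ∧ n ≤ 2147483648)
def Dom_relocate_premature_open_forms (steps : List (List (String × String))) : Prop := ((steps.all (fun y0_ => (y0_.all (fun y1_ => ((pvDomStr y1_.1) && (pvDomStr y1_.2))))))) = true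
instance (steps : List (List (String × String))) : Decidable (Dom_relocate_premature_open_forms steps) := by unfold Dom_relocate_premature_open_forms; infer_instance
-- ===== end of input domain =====

-- B replaces A's inner scan between open_form and first use by per-form sorted index
-- lists queried with bisect, merges A's two detection passes into one, and builds the
-- output as a flat comprehension instead of A's skip/insert accumulator loop.

-- shared primitive: s.get(k) on a step dict (a step is an association list)
def pvGet (s : List (String × String)) (k : String) : Option String :=
  (PySem.Dict.mk s).get? k

-- `fid = s.get("form_id")` followed by Python truthiness `if fid:` (some ↔ key present and non-empty)
def pvFid (s : List (String × String)) : Option String :=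
  match pvGet s "form_id" with
  | some f => if f = "" then none else some f
  | none => none

-- ===== PORT A =====
def pvUSAGE_TYPES : PySem.Set String :=
  PySem.Set.ofList ["invoke", "update_fields", "pick_basedata"]

def relocate_premature_open_forms (steps : List (List (String × String))) : List (List (String × String)) :=
  -- 1) open_form_info : form_id → (index, step)
  let open_form_info : PySem.Dict String (Int × List (String × String)) :=
    (PySem.List.enumerate steps).foldl (fun d p =>
      if pvGet p.2 "type" == some "open_form" then
        match pvFid p.2 with
        | some fid => d.insert fid (p.1, p.2)
        | none => d
      else d) PySem.Dict.empty
  -- 2) first_use : form_id → first index whose type is in USAGE_TYPES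
  let first_use : PySem.Dict String Int :=
    (PySem.List.enumerate steps).foldl (fun d p =>
      match pvFid p.2 with
      | some fid =>
        if ((match pvGet p.2 "type" with
             | some t => pvUSAGE_TYPES.contains t
             | none => false) && !(d.contains fid)) then d.insert fid p.1 else d
      | none => d) PySem.Dict.empty
  -- 3) which open_forms to relocate : orig_idx → (form_id, step, target_idx)
  let to_relocate : PySem.Dict Int (String × List (String × String) × Int) :=
    open_form_info.items.foldl (fun d q =>
      match first_use.get? q.1 with
      | none => d
      | some use_idx =>
        if use_idx ≤ q.2.1 + 1 then d
        else
          -- 'for j in range(oidx+1, use_idx): … break' computing a flag is an `any`;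
          -- steps[j] is always in range here, so pyGetD with default [] is exact
          let has_other_form := (PySem.List.pyRange (q.2.1 + 1) use_idx).any
            (fun j => !(pvGet (PySem.List.pyGetD steps j []) "form_id" == some q.1))
          if has_other_form then d.insert q.2.1 (q.1, q.2.2, use_idx) else d)
      PySem.Dict.empty
  if to_relocate.items = [] then steps
  else
    -- 4) rebuild
    let skip_indices : PySem.Set Int := PySem.Set.ofList to_relocate.keys
    let insert_before : PySem.Dict Int (List (List (String × String))) :=
      to_relocate.items.foldl (fun d q => d.modify q.2.2.2 [] (· ++ [q.2.2.1]))
        PySem.Dict.empty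
    (PySem.List.enumerate steps).foldl (fun out p =>
      if skip_indices.contains p.1 then out
      else (out ++ insert_before.getD p.1 []) ++ [p.2]) []

-- ===== PORT B =====
def relocate_premature_open_forms_alt (steps : List (List (String × String))) : List (List (String × String)) :=
  -- sorted positions of every step carrying each (truthy) form_id
  let positions : PySem.Dict String (List Int) :=
    (PySem.List.enumerate steps).foldl (fun d p =>
      match pvFid p.2 with
      | some fid => d.modify fid [] (· ++ [p.1])
      | none => d) PySem.Dict.empty
  -- one combined pass: last open_form index and first usage index per form_id
  let USAGE : List String := ["invoke", "update_fields", "pick_basedata"]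
  let ofu : PySem.Dict String Int × PySem.Dict String Int :=
    (PySem.List.enumerate steps).foldl (fun ac p =>
      match pvFid p.2 with
      | some fid =>
        let t := pvGet p.2 "type"
        if t == some "open_form" then (ac.1.insert fid p.1, ac.2)
        else if ((match t with
                  | some t' => USAGE.contains t'
                  | none => false) && !(ac.2.contains fid)) then (ac.1, ac.2.insert fid p.1)
        else ac
      | none => ac) (PySem.Dict.empty, PySem.Dict.empty)
  -- decide the moves: count same-form steps strictly between oidx and its first use
  let moves : List (Int × Int) :=
    ofu.1.items.foldl (fun ms q =>
      match ofu.2.get? q.1 with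
      | some u =>
        if q.2 + 1 < u then
          -- positions[fid]: the key is always present here, so getD is exact
          let lst := positions.getD q.1 []
          if ((PySem.List.bisectLeft lst u : Int) - (PySem.List.bisectRight lst q.2 : Int))
              < u - q.2 - 1 then ms ++ [(q.2, u)] else ms
        else ms
      | none => ms) []
  if moves = [] then steps
  else
    let removed : PySem.Set Int := PySem.Set.ofList (moves.map (·.1))
    let inserts : PySem.Dict Int (List (List (String × String))) :=
      moves.foldl (fun d m => d.modify m.2 [] (· ++ [PySem.List.pyGetD steps m.1 []]))
        PySem.Dict.empty
    (PySem.List.enumerate steps).flatMap (fun p =>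
      if removed.contains p.1 then [] else inserts.getD p.1 [] ++ [p.2])

-- ===== PRECONDITION & SPEC =====
def Spec_relocate_premature_open_forms (steps : List (List (String × String))) (out : List (List (String × String))) : Prop := out = relocate_premature_open_forms_alt steps
instance (steps : List (List (String × String))) (out : List (List (String × String))) : Decidable (Spec_relocate_premature_open_forms steps out) := by unfold Spec_relocate_premature_open_forms; infer_instance

-- ===== CLAIM (what is proved, stated in full; the proofs are below) =====
def Claim_equal_relocate_premature_open_forms : Prop := ∀ (steps : List (List (String × String))), Dom_relocate_premature_open_forms steps → Spec_relocate_premature_open_forms steps (relocate_premature_open_forms steps)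

-- ===== LEMMAS AND PROOFS =====

-- ===== proof-side names for the let-bound stages of the two ports (definitionally equal) =====

def pvA1 (steps : List (List (String × String))) : PySem.Dict String (Int × List (String × String)) :=
  (PySem.List.enumerate steps).foldl (fun d p =>
    if pvGet p.2 "type" == some "open_form" then
      match pvFid p.2 with
      | some fid => d.insert fid (p.1, p.2)
      | none => d
    else d) PySem.Dict.empty

def pvA2 (steps : List (List (String × String))) : PySem.Dict String Int :=
  (PySem.List.enumerate steps).foldl (fun d p =>
    match pvFid p.2 with
    | some fid =>
      if ((match pvGet p.2 "type" with
           | some t => pvUSAGE_TYPES.contains t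
           | none => false) && !(d.contains fid)) then d.insert fid p.1 else d
    | none => d) PySem.Dict.empty

def pvA3 (steps : List (List (String × String))) : PySem.Dict Int (String × List (String × String) × Int) :=
  (pvA1 steps).items.foldl (fun d q =>
    match (pvA2 steps).get? q.1 with
    | none => d
    | some use_idx =>
      if use_idx ≤ q.2.1 + 1 then d
      else
        let has_other_form := (PySem.List.pyRange (q.2.1 + 1) use_idx).any
          (fun j => !(pvGet (PySem.List.pyGetD steps j []) "form_id" == some q.1))
        if has_other_form then d.insert q.2.1 (q.1, q.2.2, use_idx) else d)
    PySem.Dict.empty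

def pvB1 (steps : List (List (String × String))) : PySem.Dict String (List Int) :=
  (PySem.List.enumerate steps).foldl (fun d p =>
    match pvFid p.2 with
    | some fid => d.modify fid [] (· ++ [p.1])
    | none => d) PySem.Dict.empty

def pvB2 (steps : List (List (String × String))) : PySem.Dict String Int × PySem.Dict String Int :=
  (PySem.List.enumerate steps).foldl (fun ac p =>
    match pvFid p.2 with
    | some fid =>
      let t := pvGet p.2 "type"
      if t == some "open_form" then (ac.1.insert fid p.1, ac.2)
      else if ((match t with
                | some t' => (["invoke", "update_fields", "pick_basedata"]).contains t'
                | none => false) && !(ac.2.contains fid)) then (ac.1, ac.2.insert fid p.1)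
      else ac
    | none => ac) (PySem.Dict.empty, PySem.Dict.empty)

def pvMoves (steps : List (List (String × String))) : List (Int × Int) :=
  (pvB2 steps).1.items.foldl (fun ms q =>
    match (pvB2 steps).2.get? q.1 with
    | some u =>
      if q.2 + 1 < u then
        let lst := (pvB1 steps).getD q.1 []
        if ((PySem.List.bisectLeft lst u : Int) - (PySem.List.bisectRight lst q.2 : Int))
            < u - q.2 - 1 then ms ++ [(q.2, u)] else ms
      else ms
    | none => ms) []


-- ===== generic helper lemmas =====

theorem pvItemsInvFoldl {κ ν β : Type} [BEq κ] (f : PySem.Dict κ ν → β → PySem.Dict κ ν)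
    (l : List β) (d : PySem.Dict κ ν) (P : κ × ν → Prop)
    (hstep : ∀ d b, b ∈ l → (∀ q ∈ d.items, P q) → ∀ q ∈ (f d b).items, P q)
    (hd : ∀ q ∈ d.items, P q) : ∀ q ∈ (l.foldl f d).items, P q := by
  induction l generalizing d with
  | nil => simpa using hd
  | cons b t ih =>
    simp only [List.foldl_cons]
    exact ih _ (fun d' b' hb' => hstep d' b' (by simp [hb'])) (hstep d b (by simp) hd)

theorem pvNodupKeysFoldl {κ ν β : Type} [BEq κ] (f : PySem.Dict κ ν → β → PySem.Dict κ ν)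
    (l : List β) (d : PySem.Dict κ ν)
    (hstep : ∀ d b, d.keys.Nodup → (f d b).keys.Nodup)
    (hd : d.keys.Nodup) : (l.foldl f d).keys.Nodup := by
  induction l generalizing d with
  | nil => simpa using hd
  | cons b t ih => exact ih _ (hstep d b hd)

theorem pvFoldlInsertFilter {κ ν β : Type} [BEq κ] (C : β → Bool) (k : β → κ) (v : β → ν)
    (l : List β) (d : PySem.Dict κ ν) :
    l.foldl (fun d q => if C q then d.insert (k q) (v q) else d) d
      = (l.filter C).foldl (fun d q => d.insert (k q) (v q)) d := by
  induction l generalizing d with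
  | nil => rfl
  | cons b t ih =>
    by_cases hb : C b <;> simp [hb, ih]

theorem pvCountPPrefix (xs : List Int) (p : Int → Bool) (n : Nat) (hn : n ≤ xs.length)
    (h1 : ∀ (j : Nat) (hj : j < xs.length), j < n → p xs[j])
    (h2 : ∀ (j : Nat) (hj : j < xs.length), n ≤ j → ¬ p xs[j] = true) :
    xs.countP p = n := by
  induction xs generalizing n with
  | nil =>
    simp only [List.length_nil, Nat.le_zero] at hn
    simp [hn]
  | cons x t ih =>
    cases n with
    | zero =>
      simp only [List.countP_eq_zero]
      intro a ha
      rcases List.mem_iff_getElem.mp ha with ⟨j, hj, rfl⟩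
      exact h2 j hj (Nat.zero_le j)
    | succ m =>
      have hx : p x = true := h1 0 (by simp) (by omega)
      rw [List.countP_cons_of_pos hx]
      have := ih m (by simpa using hn)
        (fun j hj hjm => h1 (j+1) (by simpa using Nat.succ_lt_succ hj) (by omega))
        (fun j hj hjm => h2 (j+1) (by simpa using Nat.succ_lt_succ hj) (by omega))
      omega

theorem pvCountPLtSplit (xs : List Int) (o u : Int) (h : o < u) :
    xs.countP (fun j => decide (j < u))
      = xs.countP (fun j => decide (j ≤ o))
        + xs.countP (fun j => decide (o < j) && decide (j < u)) := by
  induction xs with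
  | nil => simp
  | cons x t ih =>
    by_cases h1 : x ≤ o <;> by_cases h2 : x < u <;> by_cases h3 : o < x <;>
      simp [List.countP_cons, h1, h2, h3, ih] <;> omega

theorem pvFid_some_ne_empty {s : List (String × String)} {f : String}
    (h : pvFid s = some f) : f ≠ "" := by
  unfold pvFid at h
  cases hg : pvGet s "form_id" with
  | none => simp [hg] at h
  | some g =>
    rw [hg] at h
    by_cases hge : g = ""
    · simp [hge] at h
    · simp [hge] at h
      exact h ▸ hge

theorem pvGet_eq_pvFid (s : List (String × String)) (fid : String) (h : fid ≠ "") :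
    (pvGet s "form_id" == some fid) = (pvFid s == some fid) := by
  unfold pvFid
  cases hg : pvGet s "form_id" with
  | none => simp
  | some g =>
    by_cases hge : g = ""
    · subst hge
      simp [Ne.symm h]
    · simp [hge]

-- ===== relating B's combined pass to A's two passes =====

def pvPhi (d : PySem.Dict String (Int × List (String × String))) : PySem.Dict String Int :=
  PySem.Dict.mk (d.items.map (fun q => (q.1, q.2.1)))

theorem pvPhi_contains (d : PySem.Dict String (Int × List (String × String))) (k : String) :
    (pvPhi d).contains k = d.contains k := by
  simp only [pvPhi, PySem.Dict.contains, List.any_map]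
  rfl

theorem pvPhi_insert (d : PySem.Dict String (Int × List (String × String)))
    (k : String) (i : Int) (s : List (String × String)) :
    pvPhi (d.insert k (i, s)) = (pvPhi d).insert k i := by
  apply PySem.Dict.ext
  show ((d.insert k (i, s)).items.map (fun q => (q.1, q.2.1))) = ((pvPhi d).insert k i).items
  rw [PySem.Dict.items_insert, PySem.Dict.items_insert, pvPhi_contains]
  by_cases hc : d.contains k
  · simp only [hc, if_true, List.map_map]
    show _ = List.map (fun p => if (p.1 == k) = true then (k, i) else p) (pvPhi d).items
    simp only [pvPhi, List.map_map]
    apply List.map_congr_left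
    intro q _
    by_cases hq : q.1 == k <;> simp [hq, Function.comp]
  · simp only [hc, if_false, Bool.false_eq_true, List.map_append]
    rfl

theorem pvB2_fst_proj (l : List (Int × List (String × String)))
    (ac : PySem.Dict String Int × PySem.Dict String Int) :
    (l.foldl (fun ac p =>
      match pvFid p.2 with
      | some fid =>
        let t := pvGet p.2 "type"
        if t == some "open_form" then (ac.1.insert fid p.1, ac.2)
        else if ((match t with
                  | some t' => (["invoke", "update_fields", "pick_basedata"]).contains t'
                  | none => false) && !(ac.2.contains fid)) then (ac.1, ac.2.insert fid p.1)
        else ac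
      | none => ac) ac).1
    = l.foldl (fun a p =>
        match pvFid p.2 with
        | some fid => if pvGet p.2 "type" == some "open_form" then a.insert fid p.1 else a
        | none => a) ac.1 := by
  induction l generalizing ac with
  | nil => rfl
  | cons p t ih =>
    simp only [List.foldl_cons]
    rw [ih]
    congr 1
    cases hf : pvFid p.2 with
    | none => rfl
    | some fid =>
      simp only
      by_cases ht : pvGet p.2 "type" == some "open_form"
      · simp [ht]
      · simp only [ht, if_false, Bool.false_eq_true]
        generalize ((match pvGet p.2 "type" with
                     | some t' => (["invoke", "update_fields", "pick_basedata"] : List String).contains t'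
                     | none => false) && !(ac.2.contains fid)) = c
        cases c <;> rfl

theorem pvB2_snd_proj (l : List (Int × List (String × String)))
    (ac : PySem.Dict String Int × PySem.Dict String Int) :
    (l.foldl (fun ac p =>
      match pvFid p.2 with
      | some fid =>
        let t := pvGet p.2 "type"
        if t == some "open_form" then (ac.1.insert fid p.1, ac.2)
        else if ((match t with
                  | some t' => (["invoke", "update_fields", "pick_basedata"]).contains t'
                  | none => false) && !(ac.2.contains fid)) then (ac.1, ac.2.insert fid p.1)
        else ac
      | none => ac) ac).2
    = l.foldl (fun d p =>
        match pvFid p.2 with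
        | some fid =>
          if ((match pvGet p.2 "type" with
               | some t => pvUSAGE_TYPES.contains t
               | none => false) && !(d.contains fid)) then d.insert fid p.1 else d
        | none => d) ac.2 := by
  induction l generalizing ac with
  | nil => rfl
  | cons p t ih =>
    simp only [List.foldl_cons]
    rw [ih]
    congr 1
    cases hf : pvFid p.2 with
    | none => rfl
    | some fid =>
      simp only
      by_cases ht : pvGet p.2 "type" == some "open_form"
      · have htv : pvGet p.2 "type" = some "open_form" := by simpa using ht
        have hus : (match pvGet p.2 "type" with
                    | some t => pvUSAGE_TYPES.contains t
                    | none => false) = false := by rw [htv]; decide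
        simp only [ht, if_true, hus, Bool.false_and, Bool.false_eq_true, if_false]
      · have husage : (match pvGet p.2 "type" with
                       | some t' => (["invoke", "update_fields", "pick_basedata"] : List String).contains t'
                       | none => false)
              = (match pvGet p.2 "type" with
                 | some t => pvUSAGE_TYPES.contains t
                 | none => false) := by
          cases pvGet p.2 "type" <;> rfl
        simp only [ht, if_false, Bool.false_eq_true, husage]
        generalize ((match pvGet p.2 "type" with
                     | some t => pvUSAGE_TYPES.contains t
                     | none => false) && !(ac.2.contains fid)) = c
        cases c <;> rfl

theorem pvPhi_foldl (l : List (Int × List (String × String)))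
    (d : PySem.Dict String (Int × List (String × String))) :
    l.foldl (fun a p =>
        match pvFid p.2 with
        | some fid => if pvGet p.2 "type" == some "open_form" then a.insert fid p.1 else a
        | none => a) (pvPhi d)
    = pvPhi (l.foldl (fun d p =>
        if pvGet p.2 "type" == some "open_form" then
          match pvFid p.2 with
          | some fid => d.insert fid (p.1, p.2)
          | none => d
        else d) d) := by
  induction l generalizing d with
  | nil => rfl
  | cons p t ih =>
    simp only [List.foldl_cons]
    rw [← ih]
    congr 1
    by_cases ht : pvGet p.2 "type" == some "open_form"
    · cases hf : pvFid p.2 with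
      | none => simp [ht, hf]
      | some fid =>
        simp only [ht, hf, if_true]
        exact (pvPhi_insert d fid p.1 p.2).symm
    · simp only [ht, Bool.false_eq_true, if_false]
      cases pvFid p.2 <;> rfl

theorem pvB2_fst (steps : List (List (String × String))) :
    (pvB2 steps).1 = pvPhi (pvA1 steps) := by
  unfold pvB2 pvA1
  rw [pvB2_fst_proj]
  have h0 : ((PySem.Dict.empty, PySem.Dict.empty) :
      PySem.Dict String Int × PySem.Dict String Int).1 = pvPhi PySem.Dict.empty := rfl
  rw [h0, pvPhi_foldl]

theorem pvB2_snd (steps : List (List (String × String))) :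
    (pvB2 steps).2 = pvA2 steps := by
  unfold pvB2 pvA2
  rw [pvB2_snd_proj]

-- ===== invariants of the collected dictionaries =====

theorem pvMemEnumerate (steps : List (List (String × String))) (p : Int × List (String × String))
    (hp : p ∈ PySem.List.enumerate steps) :
    0 ≤ p.1 ∧ p.1 < (steps.length : Int) ∧ PySem.List.pyGetD steps p.1 [] = p.2 := by
  rcases (PySem.List.mem_enumerate_iff steps 0 p).mp hp with ⟨k, hk, rfl⟩
  refine ⟨by simp, by simpa using hk, ?_⟩
  simp [PySem.List.pyGetD_natCast, List.getD, hk]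

theorem pvA1_inv (steps : List (List (String × String))) :
    ∀ q ∈ (pvA1 steps).items,
      pvFid q.2.2 = some q.1 ∧ 0 ≤ q.2.1 ∧ q.2.1 < (steps.length : Int)
        ∧ PySem.List.pyGetD steps q.2.1 [] = q.2.2 := by
  unfold pvA1
  apply pvItemsInvFoldl
  · intro d b hb hd q hq
    by_cases ht : pvGet b.2 "type" == some "open_form"
    · cases hf : pvFid b.2 with
      | none => simp only [ht, if_true, hf] at hq; exact hd q hq
      | some fid =>
        simp only [ht, if_true, hf] at hq
        rcases (PySem.Dict.mem_items_insert _ _ _ _).mp hq with rfl | ⟨hq', _⟩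
        · rcases pvMemEnumerate steps b hb with ⟨h0, h1, h2⟩
          exact ⟨hf, h0, h1, h2⟩
        · exact hd q hq'
    · simp only [ht, Bool.false_eq_true, if_false] at hq; exact hd q hq
  · intro q hq
    simp [PySem.Dict.empty, PySem.Dict.items] at hq

theorem pvA2_inv (steps : List (List (String × String))) :
    ∀ q ∈ (pvA2 steps).items, 0 ≤ q.2 ∧ q.2 < (steps.length : Int) := by
  unfold pvA2
  apply pvItemsInvFoldl
  · intro d b hb hd q hq
    cases hf : pvFid b.2 with
    | none => simp only [hf] at hq; exact hd q hq
    | some fid =>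
      simp only [hf] at hq
      generalize ((match pvGet b.2 "type" with
                   | some t => pvUSAGE_TYPES.contains t
                   | none => false) && !(d.contains fid)) = c at hq
      cases c with
      | true =>
        simp only [if_true] at hq
        rcases (PySem.Dict.mem_items_insert _ _ _ _).mp hq with rfl | ⟨hq', _⟩
        · rcases pvMemEnumerate steps b hb with ⟨h0, h1, _⟩
          exact ⟨h0, h1⟩
        · exact hd q hq'
      | false =>
        simp only [Bool.false_eq_true, if_false] at hq
        exact hd q hq
  · intro q hq
    simp [PySem.Dict.empty, PySem.Dict.items] at hq

theorem pvA1_nodup_keys (steps : List (List (String × String))) :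
    (pvA1 steps).keys.Nodup := by
  unfold pvA1
  apply pvNodupKeysFoldl
  · intro d b hd
    by_cases ht : pvGet b.2 "type" == some "open_form"
    · cases hf : pvFid b.2 with
      | none => simpa [ht, hf] using hd
      | some fid =>
        simp only [ht, if_true, hf]
        exact PySem.Dict.nodup_keys_insert _ _ _ hd
    · simpa [ht] using hd
  · simp [PySem.Dict.empty, PySem.Dict.keys, PySem.Dict.items]

-- ===== characterizing B's per-form position lists =====

theorem pvB1_eq_modify_fold (steps : List (List (String × String))) :
    pvB1 steps
      = ((PySem.List.enumerate steps).filterMap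
            (fun p => (pvFid p.2).map (fun f => (f, p.1)))).foldl
          (fun d p => d.modify p.1 [] (· ++ [p.2])) PySem.Dict.empty := by
  unfold pvB1
  generalize PySem.List.enumerate steps = l
  generalize (PySem.Dict.empty : PySem.Dict String (List Int)) = d
  induction l generalizing d with
  | nil => rfl
  | cons p t ih =>
    simp only [List.foldl_cons, List.filterMap_cons]
    cases hf : pvFid p.2 <;> simp only [Option.map_none, Option.map_some, List.foldl_cons] <;> exact ih _

theorem pvFilterMap_filter (l : List (Int × List (String × String))) (fid : String) :
    ((l.filterMap (fun p => (pvFid p.2).map (fun f => (f, p.1)))).filter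
        (fun p => p.1 == fid)).map (fun x => x.2)
      = (l.filter (fun p => pvFid p.2 == some fid)).map (fun p => p.1) := by
  induction l with
  | nil => rfl
  | cons p t ih =>
    simp only [List.filterMap_cons, List.filter_cons]
    cases hf : pvFid p.2 with
    | none => simpa [hf] using ih
    | some f =>
      by_cases hff : f = fid
      · subst hff
        simp [hf, List.filter_cons, ih]
      · simp [hf, List.filter_cons, hff, ih]

theorem pvB1_getD (steps : List (List (String × String))) (fid : String) :
    (pvB1 steps).getD fid []
      = ((PySem.List.enumerate steps).filter (fun p => pvFid p.2 == some fid)).map (fun p => p.1) := by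
  rw [pvB1_eq_modify_fold, PySem.Dict.getD_foldl_modify_append, pvFilterMap_filter]
  simp [PySem.Dict.empty, PySem.Dict.getD, PySem.Dict.get?]

theorem pvB1_getD_range (steps : List (List (String × String))) (fid : String) :
    (pvB1 steps).getD fid []
      = (PySem.List.pyRange 0 (steps.length : Int)).filter
          (fun j => pvFid (PySem.List.pyGetD steps j []) == some fid) := by
  rw [pvB1_getD, PySem.List.enumerate_eq_map_pyRange steps [], List.filter_map, List.map_map]
  have : (PySem.List.len steps) = (steps.length : Int) := by simp [PySem.List.len]
  rw [this]
  rw [show ((fun (p : Int × List (String × String)) => pvFid p.2 == some fid)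
        ∘ fun j => (j, PySem.List.pyGetD steps j []))
      = (fun j => pvFid (PySem.List.pyGetD steps j []) == some fid) from rfl]
  rw [show ((fun (p : Int × List (String × String)) => p.1)
        ∘ fun j => (j, PySem.List.pyGetD steps j [])) = (id : Int → Int) from rfl]
  rw [List.map_id]

theorem pvB1_sorted (steps : List (List (String × String))) (fid : String) :
    ((pvB1 steps).getD fid []).Pairwise (· ≤ ·) := by
  rw [pvB1_getD_range]
  exact ((PySem.List.pairwise_lt_pyRange_one 0 (steps.length : Int)).filter _).imp (fun h => le_of_lt h)

-- ===== the core: A's intervening-step scan ≡ B's bisect count =====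

theorem pvCountRangeSplit (n o u : Int) (Q : Int → Bool) (ho : 0 ≤ o) (hou : o + 1 ≤ u)
    (hun : u ≤ n) :
    (PySem.List.pyRange 0 n).countP (fun a => (decide (o < a) && decide (a < u)) && Q a)
      = (PySem.List.pyRange (o + 1) u).countP Q := by
  have hr1 : PySem.List.pyRange 0 n = PySem.List.pyRange 0 u ++ PySem.List.pyRange u n :=
    PySem.List.pyRange_one_append 0 u n (by omega) hun
  have hr2 : PySem.List.pyRange 0 u
      = PySem.List.pyRange 0 (o + 1) ++ PySem.List.pyRange (o + 1) u :=
    PySem.List.pyRange_one_append 0 (o + 1) u (by omega) (by omega)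
  rw [hr1, hr2, List.countP_append, List.countP_append]
  have hz1 : (PySem.List.pyRange 0 (o + 1)).countP
      (fun a => (decide (o < a) && decide (a < u)) && Q a) = 0 := by
    rw [List.countP_eq_zero]
    intro j hj
    have := PySem.List.mem_pyRange_one.mp hj
    simp [show ¬ (o < j) by omega]
  have hz2 : (PySem.List.pyRange u n).countP
      (fun a => (decide (o < a) && decide (a < u)) && Q a) = 0 := by
    rw [List.countP_eq_zero]
    intro j hj
    have := PySem.List.mem_pyRange_one.mp hj
    simp [show ¬ (j < u) by omega]
  have hc : (PySem.List.pyRange (o + 1) u).countP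
      (fun a => (decide (o < a) && decide (a < u)) && Q a)
      = (PySem.List.pyRange (o + 1) u).countP Q := by
    apply List.countP_congr
    intro j hj
    have := PySem.List.mem_pyRange_one.mp hj
    simp [show o < j by omega, show j < u by omega]
  omega

theorem pvCondEq (steps : List (List (String × String))) (fid : String) (o u : Int)
    (hfid : fid ≠ "") (ho : 0 ≤ o) (hun : u ≤ (steps.length : Int)) (hou : o + 1 < u) :
    ((PySem.List.pyRange (o + 1) u).any
        (fun j => !(pvGet (PySem.List.pyGetD steps j []) "form_id" == some fid)))
      = decide (((PySem.List.bisectLeft ((pvB1 steps).getD fid []) u : Int))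
          - ((PySem.List.bisectRight ((pvB1 steps).getD fid []) o : Int)) < u - o - 1) := by
  have hsort : ((pvB1 steps).getD fid []).Pairwise (· ≤ ·) := pvB1_sorted steps fid
  set lst := (pvB1 steps).getD fid [] with hlst
  obtain ⟨hbl1, hbl2, hbl3⟩ := PySem.List.bisectLeft_spec lst u hsort
  obtain ⟨hbr1, hbr2, hbr3⟩ := PySem.List.bisectRight_spec lst o hsort
  have hblc : lst.countP (fun j => decide (j < u)) = PySem.List.bisectLeft lst u :=
    pvCountPPrefix lst _ _ hbl1
      (fun j hj hjn => by simpa using hbl2 j hj hjn)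
      (fun j hj hjn => by simpa using not_lt.mpr (hbl3 j hj hjn))
  have hbrc : lst.countP (fun j => decide (j ≤ o)) = PySem.List.bisectRight lst o :=
    pvCountPPrefix lst _ _ hbr1
      (fun j hj hjn => by simpa using hbr2 j hj hjn)
      (fun j hj hjn => by simpa using not_le.mpr (hbr3 j hj hjn))
  have hsplit := pvCountPLtSplit lst o u (by omega)
  -- the strictly-between count over lst is the same count over the scanned range
  have hmid : lst.countP (fun j => decide (o < j) && decide (j < u))
      = (PySem.List.pyRange (o + 1) u).countP
          (fun j => pvFid (PySem.List.pyGetD steps j []) == some fid) := by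
    rw [hlst, pvB1_getD_range, List.countP_filter]
    exact pvCountRangeSplit (steps.length : Int) o u _ ho (by omega) hun
  have hlen : (((PySem.List.pyRange (o + 1) u).length : Nat) : Int) = u - o - 1 := by
    rw [PySem.List.length_pyRange_one]
    omega
  have hpred : (fun j => !(pvGet (PySem.List.pyGetD steps j []) "form_id" == some fid))
      = (fun j => !(pvFid (PySem.List.pyGetD steps j []) == some fid)) := by
    funext j
    rw [pvGet_eq_pvFid _ _ hfid]
  rw [hpred]
  have hle : (PySem.List.pyRange (o + 1) u).countP
        (fun j => pvFid (PySem.List.pyGetD steps j []) == some fid)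
      ≤ (PySem.List.pyRange (o + 1) u).length :=
    List.countP_le_length
  by_cases hc : (PySem.List.pyRange (o + 1) u).countP
      (fun j => pvFid (PySem.List.pyGetD steps j []) == some fid)
      < (PySem.List.pyRange (o + 1) u).length
  · have hrhs : ((PySem.List.bisectLeft lst u : Int)) - ((PySem.List.bisectRight lst o : Int))
        < u - o - 1 := by omega
    rw [decide_eq_true hrhs]
    have hnall : ¬ ∀ x ∈ PySem.List.pyRange (o + 1) u,
        (pvFid (PySem.List.pyGetD steps x []) == some fid) = true := by
      intro hall
      rw [← List.countP_eq_length] at hall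
      omega
    push Not at hnall
    obtain ⟨x, hx, hpx⟩ := hnall
    exact List.any_eq_true.mpr ⟨x, hx, by simp [hpx]⟩
  · have hall : ∀ x ∈ PySem.List.pyRange (o + 1) u,
        (pvFid (PySem.List.pyGetD steps x []) == some fid) = true :=
      List.countP_eq_length.mp (by omega)
    have hrhs : ¬ (((PySem.List.bisectLeft lst u : Int)) - ((PySem.List.bisectRight lst o : Int))
        < u - o - 1) := by omega
    rw [decide_eq_false hrhs]
    rw [List.any_eq_false]
    intro x hx
    simp [hall x hx]

-- ===== the relocation decisions of both ports, as one filtered list =====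

def pvCA (steps : List (List (String × String))) (q : String × Int × List (String × String)) : Bool :=
  match (pvA2 steps).get? q.1 with
  | some u => decide (q.2.1 + 1 < u)
      && ((PySem.List.pyRange (q.2.1 + 1) u).any
            (fun j => !(pvGet (PySem.List.pyGetD steps j []) "form_id" == some q.1)))
  | none => false

def pvF (steps : List (List (String × String))) : List (String × Int × List (String × String)) :=
  (pvA1 steps).items.filter (pvCA steps)

theorem pvF_map_nodup (steps : List (List (String × String))) :
    ((pvF steps).map (fun q => q.2.1)).Nodup := by
  have hitems : (pvA1 steps).items.Nodup := by
    have := pvA1_nodup_keys steps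
    exact List.Nodup.of_map _ this
  apply List.Nodup.map_on _ (hitems.filter _)
  intro x hx y hy hxy
  have hx' := pvA1_inv steps x (List.mem_of_mem_filter hx)
  have hy' := pvA1_inv steps y (List.mem_of_mem_filter hy)
  have h2 : x.2.2 = y.2.2 := by rw [← hx'.2.2.2, ← hy'.2.2.2, hxy]
  have h1 : x.1 = y.1 := by
    have := hx'.1
    rw [h2, hy'.1] at this
    exact (Option.some_inj.mp this).symm
  have hkeysnd := pvA1_nodup_keys steps
  -- distinct items of a key-nodup dict with the same key are equal
  rcases x with ⟨xk, xv⟩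
  rcases y with ⟨yk, yv⟩
  simp only at h1 h2 hxy
  subst h1
  have : xv = yv := by
    have hgx := PySem.Dict.get?_of_mem_items _ (List.mem_of_mem_filter hx) hkeysnd
    have hgy := PySem.Dict.get?_of_mem_items _ (List.mem_of_mem_filter hy) hkeysnd
    rw [hgx] at hgy
    exact Option.some_inj.mp hgy
  rw [this]

theorem pvA3_items (steps : List (List (String × String))) :
    (pvA3 steps).items
      = (pvF steps).map (fun q => (q.2.1, (q.1, q.2.2, (pvA2 steps).getD q.1 0))) := by
  unfold pvA3
  have hbody : (fun (d : PySem.Dict Int (String × List (String × String) × Int)) q =>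
      match (pvA2 steps).get? q.1 with
      | none => d
      | some use_idx =>
        if use_idx ≤ q.2.1 + 1 then d
        else
          let has_other_form := (PySem.List.pyRange (q.2.1 + 1) use_idx).any
            (fun j => !(pvGet (PySem.List.pyGetD steps j []) "form_id" == some q.1))
          if has_other_form then d.insert q.2.1 (q.1, q.2.2, use_idx) else d)
    = (fun d q => if pvCA steps q
        then d.insert q.2.1 (q.1, q.2.2, (pvA2 steps).getD q.1 0) else d) := by
    funext d q
    cases hg : (pvA2 steps).get? q.1 with
    | none => simp [pvCA, hg]
    | some u =>
      by_cases h1 : u ≤ q.2.1 + 1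
      · simp [pvCA, hg, h1, show ¬ (q.2.1 + 1 < u) by omega]
      · have hgd : (pvA2 steps).getD q.1 0 = u := PySem.Dict.getD_of_get?_eq_some _ _ hg
        by_cases h2 : ((PySem.List.pyRange (q.2.1 + 1) u).any
            (fun j => !(pvGet (PySem.List.pyGetD steps j []) "form_id" == some q.1))) = true
        · simp [pvCA, hg, h1, h2, show q.2.1 + 1 < u by omega, hgd]
        · simp [pvCA, hg, h1, h2, show q.2.1 + 1 < u by omega]
  simp only [hbody]
  rw [pvFoldlInsertFilter (pvCA steps) (fun q => q.2.1)
      (fun q => (q.1, q.2.2, (pvA2 steps).getD q.1 0))]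
  rw [show List.filter (pvCA steps) (pvA1 steps).items = pvF steps from rfl]
  rw [PySem.Dict.items_foldl_insert_fresh (pvF steps) (fun q => q.2.1)
      (fun q => (q.1, q.2.2, (pvA2 steps).getD q.1 0)) PySem.Dict.empty
      (fun a _ => rfl) (pvF_map_nodup steps)]
  rfl

def pvCB (steps : List (List (String × String))) (q : String × Int) : Bool :=
  match (pvA2 steps).get? q.1 with
  | some u => decide (q.2 + 1 < u)
      && decide (((PySem.List.bisectLeft ((pvB1 steps).getD q.1 []) u : Int))
          - ((PySem.List.bisectRight ((pvB1 steps).getD q.1 []) q.2 : Int)) < u - q.2 - 1)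
  | none => false

theorem pvMoves_eq (steps : List (List (String × String))) :
    pvMoves steps = (pvF steps).map (fun q => (q.2.1, (pvA2 steps).getD q.1 0)) := by
  unfold pvMoves
  rw [pvB2_fst, pvB2_snd]
  have hbody : (fun (ms : List (Int × Int)) (q : String × Int) =>
      match (pvA2 steps).get? q.1 with
      | some u =>
        if q.2 + 1 < u then
          let lst := (pvB1 steps).getD q.1 []
          if ((PySem.List.bisectLeft lst u : Int) - (PySem.List.bisectRight lst q.2 : Int))
              < u - q.2 - 1 then ms ++ [(q.2, u)] else ms
        else ms
      | none => ms)
    = (fun ms q => if pvCB steps q then ms ++ [(q.2, (pvA2 steps).getD q.1 0)] else ms) := by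
    funext ms q
    cases hg : (pvA2 steps).get? q.1 with
    | none => simp [pvCB, hg]
    | some u =>
      by_cases h1 : q.2 + 1 < u
      · have hgd : (pvA2 steps).getD q.1 0 = u := PySem.Dict.getD_of_get?_eq_some _ _ hg
        by_cases h2 : ((PySem.List.bisectLeft ((pvB1 steps).getD q.1 []) u : Int)
            - (PySem.List.bisectRight ((pvB1 steps).getD q.1 []) q.2 : Int)) < u - q.2 - 1
        · simp [pvCB, hg, h1, h2, hgd]
        · simp [pvCB, hg, h1, h2]
      · simp [pvCB, hg, h1]
  simp only [hbody]
  rw [PySem.List.foldl_append_if (pvCB steps) (fun q => (q.2, (pvA2 steps).getD q.1 0))]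
  have hphi : (pvPhi (pvA1 steps)).items
      = (pvA1 steps).items.map (fun q => (q.1, q.2.1)) := rfl
  rw [hphi, List.filter_map, List.map_map]
  have hfc : List.filter ((pvCB steps) ∘ (fun q => (q.1, q.2.1))) (pvA1 steps).items
      = List.filter (pvCA steps) (pvA1 steps).items := by
    apply List.filter_congr
    intro q hq
    have hinv := pvA1_inv steps q hq
    show pvCB steps (q.1, q.2.1) = pvCA steps q
    cases hg : (pvA2 steps).get? q.1 with
    | none => simp [pvCB, pvCA, hg]
    | some u =>
      by_cases h1 : q.2.1 + 1 < u
      · have hfid : q.1 ≠ "" := pvFid_some_ne_empty hinv.1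
        have hun : u ≤ (steps.length : Int) := by
          have := pvA2_inv steps (q.1, u) (PySem.Dict.mem_items_of_get?_eq_some _ hg)
          exact le_of_lt this.2
        have hcond := pvCondEq steps q.1 q.2.1 u hfid hinv.2.1 hun h1
        simp only [pvCB, pvCA, hg]
        rw [← hcond]
      · simp [pvCB, pvCA, hg, h1]
  rw [hfc]
  rfl

-- ===== assembling the outputs =====

def pvOutA (steps : List (List (String × String))) : List (List (String × String)) :=
  (PySem.List.enumerate steps).foldl (fun out p =>
    if (PySem.Set.ofList (pvA3 steps).keys).contains p.1 then out
    else (out ++ ((pvA3 steps).items.foldl (fun d q => d.modify q.2.2.2 [] (· ++ [q.2.2.1]))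
        PySem.Dict.empty).getD p.1 []) ++ [p.2]) []

theorem pvA_unfold (steps : List (List (String × String))) :
    relocate_premature_open_forms steps
      = if (pvA3 steps).items = [] then steps else pvOutA steps := rfl

def pvOutB (steps : List (List (String × String))) : List (List (String × String)) :=
  (PySem.List.enumerate steps).flatMap (fun p =>
    if (PySem.Set.ofList ((pvMoves steps).map (·.1))).contains p.1 then []
    else ((pvMoves steps).foldl (fun d m => d.modify m.2 [] (· ++ [PySem.List.pyGetD steps m.1 []]))
        PySem.Dict.empty).getD p.1 [] ++ [p.2])

theorem pvB_unfold (steps : List (List (String × String))) :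
    relocate_premature_open_forms_alt steps
      = if pvMoves steps = [] then steps else pvOutB steps := rfl

theorem pvFoldFlat (sk : PySem.Set Int) (ib : PySem.Dict Int (List (List (String × String))))
    (l : List (Int × List (String × String))) :
    l.foldl (fun out p => if sk.contains p.1 then out else (out ++ ib.getD p.1 []) ++ [p.2]) []
      = l.flatMap (fun p => if sk.contains p.1 then [] else ib.getD p.1 [] ++ [p.2]) := by
  have h : (fun (out : List (List (String × String))) (p : Int × List (String × String)) =>
      if sk.contains p.1 then out else (out ++ ib.getD p.1 []) ++ [p.2])
      = (fun out p => out ++ (if sk.contains p.1 then [] else ib.getD p.1 [] ++ [p.2])) := by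
    funext out p
    split <;> simp
  rw [h, PySem.List.foldl_append_eq_flatMap]
  simp

theorem pvOut_eq (steps : List (List (String × String))) : pvOutA steps = pvOutB steps := by
  have hkeys : (pvA3 steps).keys = (pvF steps).map (fun q => q.2.1) := by
    show (pvA3 steps).items.map (fun x => x.1) = _
    rw [pvA3_items, List.map_map]
    rfl
  have hrem : (pvMoves steps).map (·.1) = (pvF steps).map (fun q => q.2.1) := by
    rw [pvMoves_eq, List.map_map]
    rfl
  have hdict : (pvA3 steps).items.foldl (fun d q => d.modify q.2.2.2 [] (· ++ [q.2.2.1]))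
        PySem.Dict.empty
      = (pvMoves steps).foldl
          (fun d m => d.modify m.2 [] (· ++ [PySem.List.pyGetD steps m.1 []]))
          PySem.Dict.empty := by
    rw [pvA3_items, pvMoves_eq, List.foldl_map, List.foldl_map]
    apply PySem.List.foldl_congr_mem
    intro acc q hq
    have hinv := pvA1_inv steps q (List.mem_of_mem_filter hq)
    show acc.modify ((pvA2 steps).getD q.1 0) [] (· ++ [q.2.2])
        = acc.modify ((pvA2 steps).getD q.1 0) [] (· ++ [PySem.List.pyGetD steps q.2.1 []])
    rw [hinv.2.2.2]
  unfold pvOutA pvOutB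
  rw [pvFoldFlat, hdict, hkeys, hrem]

-- ===== VERDICT (by name: the statement is the Claim_ definition above) =====
theorem relocate_premature_open_forms_spec : Claim_equal_relocate_premature_open_forms := by
  intro steps _
  unfold Spec_relocate_premature_open_forms
  rw [pvA_unfold, pvB_unfold]
  have hAc : ((pvA3 steps).items = []) ↔ (pvMoves steps = []) := by
    rw [pvA3_items, pvMoves_eq]
    simp
  by_cases hM : pvMoves steps = []
  · rw [if_pos (hAc.mpr hM), if_pos hM]
  · rw [if_neg (fun h => hM (hAc.mp h)), if_neg hM]
    exact pvOut_eq steps
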